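-- pv_equiv track=rewrite | github.com/ankitsjadhav/pipeline | prototype-macos/orchestrator.py | _extract_product_keywords
-- ===== SOURCE A (Python) =====
-- _PEXELS_STOPWORDS = frozenset({
--     "the", "a", "an", "of", "on", "with", "to", "into", "and", "or", "for", "in", "at", "by",
--     "as", "from", "that", "this", "it", "is", "are", "was", "were", "been", "being", "their",
--     "have", "has", "had", "do", "does", "did", "will", "would", "could", "should", "may", "might",
--     "must", "shall", "can", "need", "used", "what", "which", "when", "where", "who", "how",
-- })
--
-- def _extract_product_keywords(product_name: str, product_description: str, max_words: int = 4) -> str: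
--     """
--     Extract distinctive product keywords for Pexels (e.g. astrology, horoscope, birth chart).
--     Ensures fetched images match the ad's product/theme.
--     """
--     combined = f"{product_name} {product_description}".lower()
--     for c in ".,;:!?\"'()[]-–—":
--         combined = combined.replace(c, " ")
--     words = [w for w in combined.split() if w and len(w) > 2]
--     # Drop generic terms; keep distinctive product/theme words
--     generic = _PEXELS_STOPWORDS | {"app", "product", "daily", "using", "made", "get", "now"}
--     kept = [w for w in words if w not in generic]
--     # Dedupe while preserving order
--     seen = set()
--     unique = []
--     for w in kept:
--         if w not in seen:
--             seen.add(w)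
--             unique.append(w)
--     return " ".join(unique[:max_words]) if unique else ""
-- ===== SOURCE B (Python) =====
-- _GENERIC = frozenset({
--     "the", "a", "an", "of", "on", "with", "to", "into", "and", "or", "for", "in", "at", "by",
--     "as", "from", "that", "this", "it", "is", "are", "was", "were", "been", "being", "their",
--     "have", "has", "had", "do", "does", "did", "will", "would", "could", "should", "may", "might",
--     "must", "shall", "can", "need", "used", "what", "which", "when", "where", "who", "how",
--     "app", "product", "daily", "using", "made", "get", "now",
-- })
--
-- _PUNCT = set(".,;:!?\"'()[]-\u2013\u2014")
--
--
-- def _is_sep(ch):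
--     return ch.isspace() or ch in _PUNCT
--
--
-- def _flush(buf, seen, words):
--     w = "".join(buf)
--     if len(w) > 2 and w not in _GENERIC and w not in seen:
--         seen.add(w)
--         words.append(w)
--
--
-- def _extract_product_keywords(product_name: str, product_description: str, max_words: int = 4) -> str:
--     # single char-level scan: a word buffer is flushed at each separator
--     seen = set()
--     words = []
--     buf = []
--     for ch in (product_name + " " + product_description).lower():
--         if _is_sep(ch):
--             if buf:
--                 _flush(buf, seen, words)
--                 buf = []
--         else:
--             buf.append(ch)
--     if buf:
--         _flush(buf, seen, words)
--     return " ".join(words[:max_words])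
-- ===== Notes on version B (the rewrite author's own statement) =====
-- stated objective: alternative
-- what changed: A's pipeline of per-punctuation replace sweeps, split(), two staged filter comprehensions and a separate dedupe loop is replaced by a single character-level state machine that scans the combined string once, accumulating a word buffer and flushing it (length/stopword/dedup check) at each separator, then slices and joins.
import Mathlib
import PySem

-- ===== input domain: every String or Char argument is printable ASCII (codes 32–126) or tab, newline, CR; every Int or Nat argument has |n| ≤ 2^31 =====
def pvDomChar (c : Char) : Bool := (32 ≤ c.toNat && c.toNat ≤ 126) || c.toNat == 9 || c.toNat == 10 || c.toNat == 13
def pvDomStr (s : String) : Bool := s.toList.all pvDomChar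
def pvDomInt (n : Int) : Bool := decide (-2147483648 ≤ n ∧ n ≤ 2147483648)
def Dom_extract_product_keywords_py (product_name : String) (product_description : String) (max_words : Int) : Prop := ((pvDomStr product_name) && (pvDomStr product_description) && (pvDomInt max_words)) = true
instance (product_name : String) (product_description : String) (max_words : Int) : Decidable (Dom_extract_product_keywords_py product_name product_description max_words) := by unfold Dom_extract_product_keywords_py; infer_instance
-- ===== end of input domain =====

-- B replaces A's pipeline (replace sweeps, split, two staged filters, dedupe loop) by one
-- char-level state-machine scan with a word buffer flushed at separators (objective: alternative).

-- shared constants (the punctuation string and the stopword set of the Python module)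
def pvPunct : List Char := ".,;:!?\"'()[]-–—".toList

def pvGeneric : List (List Char) :=
  ["the".toList, "a".toList, "an".toList, "of".toList, "on".toList, "with".toList, "to".toList,
   "into".toList, "and".toList, "or".toList, "for".toList, "in".toList, "at".toList, "by".toList,
   "as".toList, "from".toList, "that".toList, "this".toList, "it".toList, "is".toList, "are".toList,
   "was".toList, "were".toList, "been".toList, "being".toList, "their".toList, "have".toList,
   "has".toList, "had".toList, "do".toList, "does".toList, "did".toList, "will".toList,
   "would".toList, "could".toList, "should".toList, "may".toList, "might".toList, "must".toList,
   "shall".toList, "can".toList, "need".toList, "used".toList, "what".toList, "which".toList,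
   "when".toList, "where".toList, "who".toList, "how".toList,
   "app".toList, "product".toList, "daily".toList, "using".toList, "made".toList, "get".toList,
   "now".toList]

-- ===== PORT A =====
def extract_product_keywords_py (product_name : String) (product_description : String) (max_words : Int) : String :=
  let combined0 := PySem.Chars.lower (product_name.toList ++ [' '] ++ product_description.toList)
  let combined := pvPunct.foldl (fun s c => PySem.Chars.replace s [c] [' ']) combined0
  let words := (PySem.Chars.split₀ combined).filter (fun w => !w.isEmpty && decide (2 < w.length))
  let kept := words.filter (fun w => !pvGeneric.contains w)
  let fin := kept.foldl
    (fun (st : PySem.Set (List Char) × List (List Char)) w =>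
      if PySem.Set.contains st.1 w then st else (PySem.Set.add st.1 w, st.2 ++ [w]))
    (PySem.Set.empty, [])
  let unique := fin.2
  if unique.isEmpty then "" else String.ofList (PySem.Chars.join [' '] (PySem.List.slice unique none (some max_words)))

-- ===== PORT B =====
-- Source B's _is_sep: is this character a word separator?
def pvSep (ch : Char) : Bool := PySem.Chars.isspace ch || pvPunct.contains ch

-- Source B's _flush: check the finished word and (conditionally) record it
def pvFlush (seen : PySem.Set (List Char)) (words : List (List Char)) (w : List Char) :
    PySem.Set (List Char) × List (List Char) :=
  if decide (2 < w.length) && !pvGeneric.contains w && !PySem.Set.contains seen w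
  then (PySem.Set.add seen w, words ++ [w]) else (seen, words)

-- the per-character step of Source B's scan loop (state = seen × words × buf)
def pvScanStep (st : PySem.Set (List Char) × List (List Char) × List Char) (ch : Char) :
    PySem.Set (List Char) × List (List Char) × List Char :=
  if pvSep ch then
    if st.2.2.isEmpty then st
    else
      let p := pvFlush st.1 st.2.1 st.2.2
      (p.1, p.2, [])
  else (st.1, st.2.1, st.2.2 ++ [ch])

def extract_product_keywords_py_alt (product_name : String) (product_description : String) (max_words : Int) : String :=
  let combined := PySem.Chars.lower (product_name.toList ++ [' '] ++ product_description.toList)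
  let fin := combined.foldl pvScanStep (PySem.Set.empty, [], [])
  let last := if fin.2.2.isEmpty then (fin.1, fin.2.1) else pvFlush fin.1 fin.2.1 fin.2.2
  String.ofList (PySem.Chars.join [' '] (PySem.List.slice last.2 none (some max_words)))

-- ===== PRECONDITION & SPEC =====
def Spec_extract_product_keywords_py (product_name : String) (product_description : String) (max_words : Int) (out : String) : Prop := out = extract_product_keywords_py_alt product_name product_description max_words
instance (product_name : String) (product_description : String) (max_words : Int) (out : String) : Decidable (Spec_extract_product_keywords_py product_name product_description max_words out) := by unfold Spec_extract_product_keywords_py; infer_instance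

-- ===== CLAIM (what is proved, stated in full; the proofs are below) =====
def Claim_equal_extract_product_keywords_py : Prop := ∀ (product_name : String) (product_description : String) (max_words : Int), Dom_extract_product_keywords_py product_name product_description max_words → Spec_extract_product_keywords_py product_name product_description max_words (extract_product_keywords_py product_name product_description max_words)

-- ===== LEMMAS AND PROOFS =====

-- the per-character cleanup A's replace sweeps amount to
def pvClean (c : Char) : Char := if pvPunct.contains c then ' ' else c

-- the token stream of a char list, split at separators (cur is the current word, reversed)
def pvTokens : List Char → List Char → List (List Char)
  | [], cur => if cur.isEmpty then [] else [cur.reverse]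
  | c :: rest, cur =>
    if pvSep c then
      if cur.isEmpty then pvTokens rest [] else cur.reverse :: pvTokens rest []
    else pvTokens rest (c :: cur)

theorem pvTokens_cons_sep (c : Char) (rest cur : List Char) (hs : pvSep c = true) :
    pvTokens (c :: rest) cur
      = if cur.isEmpty then pvTokens rest [] else cur.reverse :: pvTokens rest [] := by
  simp only [pvTokens]; rw [hs]; simp

theorem pvTokens_cons_nosep (c : Char) (rest cur : List Char) (hs : pvSep c = false) :
    pvTokens (c :: rest) cur = pvTokens rest (c :: cur) := by
  simp only [pvTokens]; rw [hs]; simp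

theorem pv_replace_go_single (c : Char) : ∀ (fuel : Nat) (l acc : List Char), l.length ≤ fuel →
    PySem.Chars.replace.go [c] [' '] fuel l acc
      = acc.reverse ++ l.map (fun x => if x = c then ' ' else x) := by
  intro fuel
  induction fuel with
  | zero =>
    intro l acc h
    have hl : l = [] := List.eq_nil_of_length_eq_zero (Nat.le_zero.mp h)
    subst hl; simp [PySem.Chars.replace.go]
  | succ n ih =>
    intro l acc h
    cases l with
    | nil => simp [PySem.Chars.replace.go]
    | cons x t =>
      by_cases hx : x = c
      · subst hx
        rw [show PySem.Chars.replace.go [x] [' '] (n+1) (x :: t) acc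
              = PySem.Chars.replace.go [x] [' '] n t ([' '].reverse ++ acc) by
            simp [PySem.Chars.replace.go, List.isPrefixOf]]
        rw [ih t ([' '].reverse ++ acc) (by simpa using h)]
        simp
      · rw [show PySem.Chars.replace.go [c] [' '] (n+1) (x :: t) acc
              = PySem.Chars.replace.go [c] [' '] n t (x :: acc) by
            simp [PySem.Chars.replace.go, List.isPrefixOf, Ne.symm hx]]
        rw [ih t (x :: acc) (by simpa using h)]
        simp [hx]

theorem pv_replace_single (s : List Char) (c : Char) :
    PySem.Chars.replace s [c] [' '] = s.map (fun x => if x = c then ' ' else x) := by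
  simp only [PySem.Chars.replace, List.isEmpty]
  exact pv_replace_go_single c s.length s [] (le_refl _)

theorem pv_fold_replace (P : List Char) : ∀ (s : List Char), ' ' ∉ P →
    P.foldl (fun s c => PySem.Chars.replace s [c] [' ']) s
      = s.map (fun x => if P.contains x then ' ' else x) := by
  induction P with
  | nil => intro s _; simp
  | cons c P ih =>
    intro s h
    have h' : ' ' ∉ P := fun hm => h (List.mem_cons_of_mem _ hm)
    have hc : ¬ (c = ' ') := fun hc => h (by simp [hc])
    simp only [List.foldl_cons]
    rw [pv_replace_single, ih _ h', List.map_map]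
    congr 1
    funext x
    by_cases hx : x = c
    · subst hx
      simp [List.contains_eq_mem, h']
    · simp [List.contains_eq_mem, hx]

-- separator test on a cleaned char = separator test on the original char
theorem pv_sep_clean (c : Char) : PySem.Chars.isspace (pvClean c) = pvSep c := by
  unfold pvClean pvSep
  cases hp : pvPunct.contains c with
  | true => simp [show PySem.Chars.isspace ' ' = true from by decide]
  | false => simp

-- A's tokenization (split₀ of the cleaned string) is the token stream of the original
theorem pv_split_go_tokens : ∀ (s cur : List Char) (acc : List (List Char)),
    PySem.Chars.split₀.go (s.map pvClean) cur acc = acc.reverse ++ pvTokens s cur := by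
  intro s
  induction s with
  | nil =>
    intro cur acc
    by_cases h : cur.isEmpty <;> simp [PySem.Chars.split₀.go, pvTokens, h]
  | cons c rest ih =>
    intro cur acc
    simp only [List.map_cons]
    cases hs : pvSep c with
    | true =>
      have hsp : PySem.Chars.isspace (pvClean c) = true := by rw [pv_sep_clean, hs]
      rw [pvTokens_cons_sep c rest cur hs]
      by_cases he : cur.isEmpty
      · rw [show PySem.Chars.split₀.go (pvClean c :: rest.map pvClean) cur acc
              = PySem.Chars.split₀.go (rest.map pvClean) [] acc from by
            simp [PySem.Chars.split₀.go, hsp, List.isEmpty_iff.mp he]]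
        rw [ih [] acc]
        simp [he]
      · rw [show PySem.Chars.split₀.go (pvClean c :: rest.map pvClean) cur acc
              = PySem.Chars.split₀.go (rest.map pvClean) [] (cur.reverse :: acc) from by
            have hne : ¬ cur = [] := by simpa [List.isEmpty_iff] using he
            simp [PySem.Chars.split₀.go, hsp, hne]]
        rw [ih [] (cur.reverse :: acc)]
        simp [he]
    | false =>
      have hsp : PySem.Chars.isspace (pvClean c) = false := by rw [pv_sep_clean, hs]
      have hnp : pvPunct.contains c = false := by
        have h2 := hs
        unfold pvSep at h2
        exact (Bool.or_eq_false_iff.mp h2).2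
      have hcl : pvClean c = c := by
        unfold pvClean
        rw [if_neg (by rw [hnp]; exact Bool.false_ne_true)]
      have hspc : PySem.Chars.isspace c = false := hcl ▸ hsp
      rw [pvTokens_cons_nosep c rest cur hs]
      rw [show PySem.Chars.split₀.go (pvClean c :: rest.map pvClean) cur acc
            = PySem.Chars.split₀.go (rest.map pvClean) (c :: cur) acc from by
          simp [PySem.Chars.split₀.go, hcl, hspc]]
      exact ih (c :: cur) acc

-- A's staged filters + dedupe loop over a token list = one fold of pvFlush
theorem pv_fuse (ws : List (List Char)) (st : PySem.Set (List Char) × List (List Char)) :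
    ((ws.filter (fun w => !w.isEmpty && decide (2 < w.length))).filter
        (fun w => !pvGeneric.contains w)).foldl
      (fun (st : PySem.Set (List Char) × List (List Char)) w =>
        if PySem.Set.contains st.1 w then st else (PySem.Set.add st.1 w, st.2 ++ [w])) st
    = ws.foldl (fun (st : PySem.Set (List Char) × List (List Char)) w => pvFlush st.1 st.2 w) st := by
  induction ws generalizing st with
  | nil => simp
  | cons w ws ih =>
    simp only [List.filter_cons]
    by_cases hl : (!w.isEmpty && decide (2 < w.length)) = true
    · rw [if_pos hl]
      have h2p : 2 < w.length := by
        have h2 := hl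
        simp only [Bool.and_eq_true, decide_eq_true_eq] at h2
        exact h2.2
      simp only [List.filter_cons]
      by_cases hg : (!pvGeneric.contains w) = true
      · have hgm : w ∉ pvGeneric := by simpa using hg
        rw [if_pos hg, List.foldl_cons, List.foldl_cons]
        have hstep : (if PySem.Set.contains st.1 w = true then st
              else (PySem.Set.add st.1 w, st.2 ++ [w])) = pvFlush st.1 st.2 w := by
          by_cases hsn : w ∈ st.1 <;> simp [pvFlush, hsn, hgm, h2p]
        rw [hstep]
        exact ih (pvFlush st.1 st.2 w)
      · have hgm : w ∈ pvGeneric := by simpa using hg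
        rw [if_neg hg, List.foldl_cons]
        have hstep : pvFlush st.1 st.2 w = st := by
          simp [pvFlush, hgm]
        rw [hstep]
        exact ih st
    · rw [if_neg hl, List.foldl_cons]
      have h2p : ¬ 2 < w.length := by
        intro hlt
        have hne : w ≠ [] := by
          intro e; subst e; simp at hlt
        exact hl (by simp [hne, hlt])
      have hstep : pvFlush st.1 st.2 w = st := by
        simp [pvFlush, h2p]
      rw [hstep]
      exact ih st

-- B's char scan followed by the final flush = the pvFlush fold over the token stream
theorem pv_scan_tokens : ∀ (s : List Char) (seen : PySem.Set (List Char))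
    (words : List (List Char)) (buf : List Char),
    (let fin := s.foldl pvScanStep (seen, words, buf)
     if fin.2.2.isEmpty then (fin.1, fin.2.1) else pvFlush fin.1 fin.2.1 fin.2.2)
    = (pvTokens s buf.reverse).foldl
        (fun (st : PySem.Set (List Char) × List (List Char)) w => pvFlush st.1 st.2 w)
        (seen, words) := by
  intro s
  induction s with
  | nil =>
    intro seen words buf
    by_cases h : buf.isEmpty
    · have hb : buf = [] := List.isEmpty_iff.mp h
      subst hb; simp [pvTokens]
    · have hne : buf ≠ [] := by simpa [List.isEmpty_iff] using h
      have hrv : buf.reverse.isEmpty = false := by simp [hne]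
      simp [pvTokens, h, hrv]
  | cons c rest ih =>
    intro seen words buf
    cases hs : pvSep c with
    | true =>
      by_cases he : buf.isEmpty
      · have hb : buf = [] := List.isEmpty_iff.mp he
        subst hb
        rw [show List.foldl pvScanStep (seen, words, []) (c :: rest)
              = List.foldl pvScanStep (seen, words, []) rest from by
            simp [pvScanStep, hs]]
        rw [show (pvTokens (c :: rest) List.nil.reverse) = pvTokens rest [] from by
            rw [List.reverse_nil, pvTokens_cons_sep c rest [] hs]; simp]
        exact ih seen words []
      · have hne : buf ≠ [] := by simpa [List.isEmpty_iff] using he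
        have hrv : buf.reverse.isEmpty = false := by simp [hne]
        rw [show List.foldl pvScanStep (seen, words, buf) (c :: rest)
              = List.foldl pvScanStep
                  ((pvFlush seen words buf).1, (pvFlush seen words buf).2, []) rest from by
            simp [pvScanStep, hs, he]]
        rw [show pvTokens (c :: rest) buf.reverse
              = buf :: pvTokens rest [] from by
            rw [pvTokens_cons_sep c rest buf.reverse hs, if_neg (by rw [hrv]; exact Bool.false_ne_true)]
            simp]
        rw [List.foldl_cons]
        have := ih (pvFlush seen words buf).1 (pvFlush seen words buf).2 []
        simpa using this
    | false =>
      rw [show List.foldl pvScanStep (seen, words, buf) (c :: rest)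
            = List.foldl pvScanStep (seen, words, buf ++ [c]) rest from by
          simp [pvScanStep, hs]]
      rw [show pvTokens (c :: rest) buf.reverse = pvTokens rest ((buf ++ [c]).reverse) from by
          rw [pvTokens_cons_nosep c rest buf.reverse hs]; simp]
      exact ih seen words (buf ++ [c])

-- ===== VERDICT (by name: the statement is the Claim_ definition above) =====
theorem extract_product_keywords_py_spec : Claim_equal_extract_product_keywords_py := by
  intro pn pd mw _
  show extract_product_keywords_py pn pd mw = extract_product_keywords_py_alt pn pd mw
  simp only [extract_product_keywords_py, extract_product_keywords_py_alt]
  rw [pv_fold_replace pvPunct _ (by decide)]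
  have hmap : ((PySem.Chars.lower (pn.toList ++ [' '] ++ pd.toList)).map
      (fun x => if pvPunct.contains x then ' ' else x) : List Char)
      = (PySem.Chars.lower (pn.toList ++ [' '] ++ pd.toList)).map pvClean := rfl
  rw [hmap]
  have hsplit : PySem.Chars.split₀ ((PySem.Chars.lower (pn.toList ++ [' '] ++ pd.toList)).map pvClean)
      = pvTokens (PySem.Chars.lower (pn.toList ++ [' '] ++ pd.toList)) [] := by
    show PySem.Chars.split₀.go _ [] [] = _
    simpa using pv_split_go_tokens (PySem.Chars.lower (pn.toList ++ [' '] ++ pd.toList)) [] []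
  rw [hsplit, pv_fuse]
  have hscan := pv_scan_tokens (PySem.Chars.lower (pn.toList ++ [' '] ++ pd.toList))
      PySem.Set.empty [] []
  simp only [List.reverse_nil] at hscan
  rw [← hscan]
  set fin := (PySem.Chars.lower (pn.toList ++ [' '] ++ pd.toList)).foldl pvScanStep
      (PySem.Set.empty, [], []) with hfin
  set u := (if fin.2.2.isEmpty then (fin.1, fin.2.1) else pvFlush fin.1 fin.2.1 fin.2.2).2 with hu
  by_cases h : u.isEmpty
  · have : u = [] := List.isEmpty_iff.mp h
    simp [this, PySem.List.slice, PySem.Chars.join, List.intercalate]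
  · simp [h]
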